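-- pv_equiv track=rewrite | github.com/RideMatch1/qubic-church | apps/web/scripts/analyze_matrix_sums.py | bytes_to_ascii
-- ===== SOURCE A (Python) =====
-- def bytes_to_ascii(byte_values, filter_printable=False):
--     """Convert byte values to ASCII string."""
--     result = ""
--     for b in byte_values:
--         b_int = int(b) % 256
--         if filter_printable:
--             if 32 <= b_int <= 126:
--                 result += chr(b_int)
--             else:
--                 result += "."
--         else:
--             try:
--                 result += chr(b_int) if 0 <= b_int < 256 else "?"
--             except:
--                 result += "?"
--     return result
-- ===== SOURCE B (Python) =====
-- _DOT_TABLE = {i: "." for i in range(256) if not (32 <= i <= 126)}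
--
-- def bytes_to_ascii(byte_values, filter_printable=False):
--     """Convert byte values to ASCII string."""
--     decoded = bytes(int(b) % 256 for b in byte_values).decode("latin-1")
--     if filter_printable:
--         return decoded.translate(_DOT_TABLE)
--     return decoded
-- ===== Notes on version B (the rewrite author's own statement) =====
-- stated objective: idiomatic
-- what changed: B bulk-converts the values to a bytes object decoded as latin-1 (chr(i) for i<256 is exactly latin-1) and, when filtering, applies a second str.translate pass with a module-level non-printable-to-dot table, instead of A's single per-element loop with a branch chain, dead range guard, try/except and repeated string concatenation.
import Mathlib
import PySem

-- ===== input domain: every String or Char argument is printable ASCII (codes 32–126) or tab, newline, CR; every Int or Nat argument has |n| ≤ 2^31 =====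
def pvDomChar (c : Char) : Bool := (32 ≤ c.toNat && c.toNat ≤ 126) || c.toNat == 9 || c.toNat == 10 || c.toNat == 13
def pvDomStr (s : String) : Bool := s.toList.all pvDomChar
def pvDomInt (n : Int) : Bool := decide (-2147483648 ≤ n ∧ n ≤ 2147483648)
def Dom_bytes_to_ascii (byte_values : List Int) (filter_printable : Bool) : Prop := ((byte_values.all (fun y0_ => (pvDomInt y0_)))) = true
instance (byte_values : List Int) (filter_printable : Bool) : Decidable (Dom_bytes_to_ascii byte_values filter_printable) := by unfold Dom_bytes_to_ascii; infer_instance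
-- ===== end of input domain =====

-- B replaces A's per-element loop (branch chain, dead range guard, try/except, string +=)
-- by two bulk passes: bytes + latin-1 decode, then a translate pass when filtering; returns proved equal.

-- ===== PORT A =====
def bytes_to_ascii (byte_values : List Int) (filter_printable : Bool) : String :=
  byte_values.foldl (fun result b =>
    let b_int : Int := PySem.Int.mod b 256
    if filter_printable then
      if 32 ≤ b_int ∧ b_int ≤ 126 then result ++ String.ofList [Char.ofNat b_int.toNat]
      else result ++ "."
    else
      -- chr never raises for 0 ≤ b_int < 256, so A's except branch is unreachable
      if 0 ≤ b_int ∧ b_int < 256 then result ++ String.ofList [Char.ofNat b_int.toNat]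
      else result ++ "?") ""

-- ===== PORT B =====
-- bytes(int(b) % 256 for b in byte_values).decode("latin-1"): latin-1 maps byte i to chr(i)
def latin1Decode (byte_values : List Int) : String :=
  String.ofList (byte_values.map (fun b => Char.ofNat (PySem.Int.mod b 256).toNat))

-- s.translate(_DOT_TABLE): replace every non-printable character by '.'
def dotTranslate (s : String) : String :=
  String.ofList (s.toList.map (fun c => if 32 ≤ c.toNat ∧ c.toNat ≤ 126 then c else '.'))

def bytes_to_ascii_alt (byte_values : List Int) (filter_printable : Bool) : String :=
  let decoded := latin1Decode byte_values
  if filter_printable then dotTranslate decoded else decoded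

-- ===== PRECONDITION & SPEC =====
def Spec_bytes_to_ascii (byte_values : List Int) (filter_printable : Bool) (out : String) : Prop := out = bytes_to_ascii_alt byte_values filter_printable
instance (byte_values : List Int) (filter_printable : Bool) (out : String) : Decidable (Spec_bytes_to_ascii byte_values filter_printable out) := by unfold Spec_bytes_to_ascii; infer_instance

-- ===== CLAIM (what is proved, stated in full; the proofs are below) =====
def Claim_equal_bytes_to_ascii : Prop := ∀ (byte_values : List Int) (filter_printable : Bool), Dom_bytes_to_ascii byte_values filter_printable → Spec_bytes_to_ascii byte_values filter_printable (bytes_to_ascii byte_values filter_printable)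

-- ===== LEMMAS AND PROOFS =====

-- the per-element character A produces
def pvStep (filter_printable : Bool) (b : Int) : Char :=
  let i := (PySem.Int.mod b 256).toNat
  if filter_printable then (if 32 ≤ i ∧ i ≤ 126 then Char.ofNat i else '.') else Char.ofNat i

theorem mod256_bounds (b : Int) : 0 ≤ PySem.Int.mod b 256 ∧ PySem.Int.mod b 256 < 256 :=
  ⟨PySem.Int.mod_nonneg b (by norm_num), PySem.Int.mod_lt b (by norm_num)⟩

theorem ofList_append (xs ys : List Char) :
    String.ofList xs ++ String.ofList ys = String.ofList (xs ++ ys) := by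
  rw [← String.toList_inj]; simp

theorem toNat_ofNat_lt256 (i : Nat) (h : i < 256) : (Char.ofNat i).toNat = i := by
  have hv : Nat.isValidChar i := Or.inl (by omega)
  simp [Char.ofNat, hv, Char.toNat, Char.ofNatAux]

-- invariant of A's accumulation loop
theorem foldl_step (filter_printable : Bool) (bs : List Int) (r : List Char) :
    bs.foldl (fun result b =>
      let b_int : Int := PySem.Int.mod b 256
      if filter_printable then
        if 32 ≤ b_int ∧ b_int ≤ 126 then result ++ String.ofList [Char.ofNat b_int.toNat]
        else result ++ "."
      else
        if 0 ≤ b_int ∧ b_int < 256 then result ++ String.ofList [Char.ofNat b_int.toNat]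
        else result ++ "?") (String.ofList r)
    = String.ofList (r ++ bs.map (pvStep filter_printable)) := by
  induction bs generalizing r with
  | nil => simp
  | cons b bs ih =>
    obtain ⟨h0, h1⟩ := mod256_bounds b
    simp only [List.foldl_cons, List.map_cons]
    have hconv : (if filter_printable then
        if 32 ≤ PySem.Int.mod b 256 ∧ PySem.Int.mod b 256 ≤ 126 then String.ofList r ++ String.ofList [Char.ofNat (PySem.Int.mod b 256).toNat]
        else String.ofList r ++ "."
      else
        if 0 ≤ PySem.Int.mod b 256 ∧ PySem.Int.mod b 256 < 256 then String.ofList r ++ String.ofList [Char.ofNat (PySem.Int.mod b 256).toNat]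
        else String.ofList r ++ "?") = String.ofList (r ++ [pvStep filter_printable b]) := by
      unfold pvStep
      cases filter_printable with
      | false =>
        simp only [Bool.false_eq_true, if_false, if_pos (And.intro h0 h1)]
        exact ofList_append r _
      | true =>
        simp only [if_true]
        by_cases hc : 32 ≤ (PySem.Int.mod b 256).toNat ∧ (PySem.Int.mod b 256).toNat ≤ 126
        · rw [if_pos (by omega), if_pos hc]; exact ofList_append r _
        · rw [if_neg (by omega), if_neg hc,
            show ("." : String) = String.ofList ['.'] from by decide]
          exact ofList_append r ['.']
    rw [hconv, ih, List.append_assoc]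
    rfl

-- B's staged passes compute the same character list
theorem alt_eq_map (byte_values : List Int) (filter_printable : Bool) :
    bytes_to_ascii_alt byte_values filter_printable
      = String.ofList (byte_values.map (pvStep filter_printable)) := by
  unfold bytes_to_ascii_alt latin1Decode dotTranslate pvStep
  cases filter_printable with
  | false => simp
  | true =>
    simp only [if_true, String.toList_ofList, List.map_map]
    congr 1
    refine List.map_congr_left (fun b _ => ?_)
    obtain ⟨h0, h1⟩ := mod256_bounds b
    have ht := toNat_ofNat_lt256 (PySem.Int.mod b 256).toNat (by omega)
    simp only [Function.comp_def, ht]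
    try split_ifs <;> first | rfl | omega

-- ===== VERDICT (by name: the statement is the Claim_ definition above) =====
theorem bytes_to_ascii_spec : Claim_equal_bytes_to_ascii := by
  intro byte_values filter_printable _
  unfold Spec_bytes_to_ascii bytes_to_ascii
  have h := foldl_step filter_printable byte_values []
  simp only [List.nil_append] at h
  rw [show ("" : String) = String.ofList [] from by decide, h, alt_eq_map]
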